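-- pv_equiv track=rewrite | github.com/noxknow/Python-Coding_test | (04) 2021 카카오 블라인드, 인턴쉽/2021 카카오 블라인드 메뉴 리뉴얼.py | check
-- ===== SOURCE A (Python) =====
-- from collections import Counter
--
-- def check(array):
--     counter = Counter(array)
--     res = []
--     if len(counter) != 0 and max(counter.values()) != 1:
--         for i in counter:
--             if counter[i] == max(counter.values()):
--                 res += ["".join(i)]
--
--     return res
-- ===== SOURCE B (Python) =====
-- from collections import Counter
--
-- def check(array):
--     # single forward pass over the counts, keeping the current champions list:
--     # reset it when a strictly larger count appears, extend it on a tie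
--     best_count = 0
--     best = []
--     for key, c in Counter(array).items():
--         if c > best_count:
--             best_count, best = c, [key]
--         elif c == best_count:
--             best.append(key)
--     return ["".join(k) for k in best] if best_count > 1 else []
-- ===== Notes on version B (the rewrite author's own statement) =====
-- stated objective: alternative
-- what changed: B drops A's two-stage find-max-then-filter (with max() recomputed inside the loop) for a single streaming pass that maintains a running champions list, resetting it when a strictly larger count appears and appending on ties, with no max() call at all.
import Mathlib
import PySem

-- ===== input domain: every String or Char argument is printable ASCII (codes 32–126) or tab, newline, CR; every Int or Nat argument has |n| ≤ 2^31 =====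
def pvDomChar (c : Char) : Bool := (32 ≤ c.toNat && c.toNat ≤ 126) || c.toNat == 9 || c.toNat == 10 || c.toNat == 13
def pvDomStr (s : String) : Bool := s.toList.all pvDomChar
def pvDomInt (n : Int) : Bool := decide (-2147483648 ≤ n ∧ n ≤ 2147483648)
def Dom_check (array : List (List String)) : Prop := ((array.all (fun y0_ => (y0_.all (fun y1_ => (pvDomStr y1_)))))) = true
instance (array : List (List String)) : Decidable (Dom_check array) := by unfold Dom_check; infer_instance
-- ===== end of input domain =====

-- B replaces A's find-max-then-filter (max() recomputed per key) with one streaming pass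
-- keeping a running champions list: reset on a strictly larger count, append on a tie.

-- ===== PORT A =====
def check (array : List (List String)) : List String :=
  let counter : PySem.Dict (List String) Int :=
    array.foldl (fun d x => d.insert x (d.getD x 0 + 1)) PySem.Dict.empty
  let res : List String := []
  if counter.items.length ≠ 0 ∧ PySem.List.max? counter.values (fun v => v) ≠ some 1 then
    counter.keys.foldl (fun res i =>
      if counter.getD i 0 = (PySem.List.max? counter.values (fun v => v)).getD 0 then
        res ++ [PySem.Str.join "" i]
      else res) res
  else res

-- ===== PORT B =====
def check_alt (array : List (List String)) : List String :=
  let st : Int × List (List String) :=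
    (PySem.Dict.counter array).items.foldl (fun s kc =>
      if s.1 < kc.2 then (kc.2, [kc.1])
      else if kc.2 = s.1 then (s.1, s.2 ++ [kc.1])
      else s) ((0 : Int), [])
  if st.1 > 1 then st.2.map (fun k => PySem.Str.join "" k) else []

-- ===== PRECONDITION & SPEC =====
def Spec_check (array : List (List String)) (out : List String) : Prop := out = check_alt array
instance (array : List (List String)) (out : List String) : Decidable (Spec_check array out) := by unfold Spec_check; infer_instance

-- ===== CLAIM (what is proved, stated in full; the proofs are below) =====
def Claim_equal_check : Prop := ∀ (array : List (List String)), Dom_check array → Spec_check array (check array)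

-- ===== LEMMAS AND PROOFS =====

-- A in closed form: over S = set(xs) with counts, keep the keys whose count is the max of the values.
theorem checkA_eq (xs : List (List String)) :
    check xs =
      if (PySem.Set.ofList xs) ≠ [] ∧
         PySem.List.max? ((PySem.Set.ofList xs).map (fun k => (xs.count k : Int))) (fun v => v) ≠ some 1 then
        ((PySem.Set.ofList xs).filter (fun k =>
            decide ((xs.count k : Int) =
              (PySem.List.max? ((PySem.Set.ofList xs).map (fun k => (xs.count k : Int))) (fun v => v)).getD 0))).map
          (fun i => PySem.Str.join "" i)
      else [] := by
  have hv : (PySem.Dict.counter xs).values = List.map (fun k => ((xs.count k : Int))) (PySem.Set.ofList xs) := by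
    simp [PySem.Dict.values, PySem.Dict.items_counter, List.map_map]
  simp only [check, PySem.Dict.foldl_insert_getD_add_one_eq_counter, hv, PySem.Dict.keys_counter,
    PySem.Dict.items_counter, PySem.Dict.getD_counter, List.length_map]
  by_cases hc : (PySem.Set.ofList xs) ≠ [] ∧
      PySem.List.max? ((PySem.Set.ofList xs).map (fun k => (xs.count k : Int))) (fun v => v) ≠ some 1
  · rw [if_pos (by simpa [List.length_eq_zero_iff] using hc), if_pos hc]
    rw [PySem.List.foldl_append_ite]
    simp
  · rw [if_neg (by simpa [List.length_eq_zero_iff] using hc), if_neg hc]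

-- B's loop invariant: the champions fold returns the running maximum of the counts
-- together with exactly the pairs achieving it (in order), projected to their keys.
theorem champ_foldl (ps : List (List String × Int)) :
    ps.foldl (fun s kc =>
        if s.1 < kc.2 then (kc.2, [kc.1])
        else if kc.2 = s.1 then (s.1, s.2 ++ [kc.1])
        else s) ((0 : Int), ([] : List (List String)))
    = (ps.foldl (fun m kc => max m kc.2) 0,
       (ps.filter (fun kc => decide (kc.2 = ps.foldl (fun m kc => max m kc.2) 0))).map Prod.fst) := by
  induction ps using List.reverseRecOn with
  | nil => simp
  | append_singleton ps kc ih =>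
    have hub := (PySem.List.le_foldl_max_int ps Prod.snd 0).2
    set M := ps.foldl (fun m kc => max m kc.2) 0 with hM
    have hM' : (ps ++ [kc]).foldl (fun m kc => max m kc.2) 0 = max M kc.2 := by
      simp [List.foldl_append, hM]
    rw [List.foldl_append, ih, hM']
    simp only [List.foldl_cons, List.foldl_nil, List.filter_append, List.map_append]
    by_cases h1 : M < kc.2
    · have hmax : max M kc.2 = kc.2 := max_eq_right (le_of_lt h1)
      rw [if_pos h1, hmax]
      have hnone : ps.filter (fun kc' => decide (kc'.2 = kc.2)) = [] := by
        refine List.filter_eq_nil_iff.mpr (fun x hx => ?_)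
        have := hub x hx
        simp only [decide_eq_true_eq]
        omega
      simp [hnone]
    · have hmax : max M kc.2 = M := max_eq_left (by omega)
      rw [if_neg h1, hmax]
      by_cases h2 : kc.2 = M
      · rw [if_pos h2]
        simp [h2]
      · rw [if_neg h2]
        simp [h2]

-- B in closed form, over the same S and counts as A's closed form.
theorem checkB_eq (xs : List (List String)) :
    check_alt xs =
      (if 1 < ((PySem.Set.ofList xs).map (fun k => (xs.count k : Int))).foldl max 0 then
        ((PySem.Set.ofList xs).filter (fun k =>
            decide ((xs.count k : Int) = ((PySem.Set.ofList xs).map (fun k => (xs.count k : Int))).foldl max 0))).map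
          (fun k => PySem.Str.join "" k)
       else []) := by
  simp only [check_alt, champ_foldl, PySem.Dict.items_counter]
  rw [List.foldl_map]
  simp only [List.filter_map, List.map_map, List.foldl_map]
  rfl

-- the two closed forms coincide: counts are ≥ 1 over a nonempty set, so the 0-seeded running
-- max equals max(values), and max ≠ 1 iff max > 1.
theorem check_agree (array : List (List String)) : check array = check_alt array := by
  rw [checkA_eq, checkB_eq]
  cases hS : PySem.Set.ofList array with
  | nil => simp
  | cons k0 S' =>
    have hpos : ∀ k ∈ PySem.Set.ofList array, (1 : Int) ≤ (array.count k : Int) := by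
      intro k hk
      have hkx : k ∈ array := (PySem.Set.mem_ofList array k).1 hk
      exact_mod_cast List.count_pos_iff.mpr hkx
    have h0 : (1 : Int) ≤ (array.count k0 : Int) := hpos k0 (by rw [hS]; exact List.mem_cons_self)
    have hmax0 : max (0 : Int) ((array.count k0 : Int)) = (array.count k0 : Int) :=
      max_eq_right (by omega)
    simp only [List.map_cons, PySem.List.max?_id_cons, List.foldl_cons, hmax0, Option.getD_some]
    set M := (S'.map (fun k => (array.count k : Int))).foldl max ((array.count k0 : Int)) with hMdef
    have hM1 : (1 : Int) ≤ M := le_trans h0 (PySem.List.le_foldl_max _ _).1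
    by_cases hone : M = 1
    · rw [if_neg (by simp [hone]), if_neg (by omega)]
    · rw [if_pos ⟨List.cons_ne_nil _ _, by simp [hone]⟩, if_pos (by omega)]

-- ===== VERDICT (by name: the statement is the Claim_ definition above) =====
theorem check_spec : Claim_equal_check := by
  intro array _
  unfold Spec_check
  exact check_agree array
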